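-- pv_equiv track=rewrite | github.com/smutyala1at/mimir | apps/meshjs-rag/app/utils/chunk_content.py | chunk_class_file
-- ===== SOURCE A (Python) =====
-- from typing import List
--
-- def flush_chunk(current_chunk: List[str], chunks: List[str]):
--   if current_chunk:
--     chunks.append("\n".join(current_chunk).strip())
--
-- def chunk_class_file(content: str) -> List[str]:
--   chunks = []
--   current_chunk = []
--   lines = content.splitlines()
--
--   for i, line in enumerate(lines):
--     if (
--         line.startswith("## Constructors") \
--         or (line.startswith("## Properties") and lines[i+2].startswith("###")) \
--         or (line.startswith("## Methods") and lines[i+2].startswith("###"))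
--       ):
--         flush_chunk(current_chunk, chunks)
--         current_chunk = [line]
--     else:
--       current_chunk.append(line)
--
--   flush_chunk(current_chunk, chunks)
--
--   if chunks and chunks[-1].startswith("## Methods"):
--     chunk = chunks.pop()
--     method_chunks = [method.strip() for method in chunk.split("***") if method.strip()]
--     chunks.extend(method_chunks)
--
--   return chunks
-- ===== SOURCE B (Python) =====
-- def chunk_class_file(content):
--     lines = content.splitlines()
--     n = len(lines)
--     # pass 1: collect boundary indices, scanning in order (same IndexError as A on short files)
--     boundaries = []
--     for i, line in enumerate(lines):
--         if line.startswith("## Constructors") or (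
--             (line.startswith("## Properties") or line.startswith("## Methods"))
--             and lines[i + 2].startswith("###")
--         ):
--             boundaries.append(i)
--     # pass 2: build chunks by slicing between consecutive boundaries
--     chunks = []
--     for a, b in zip([0] + boundaries, boundaries + [n]):
--         seg = lines[a:b]
--         if seg:
--             chunks.append("\n".join(seg).strip())
--     if chunks and chunks[-1].startswith("## Methods"):
--         chunk = chunks.pop()
--         chunks.extend(m for m in (p.strip() for p in chunk.split("***")) if m)
--     return chunks
-- ===== Notes on version B (the rewrite author's own statement) =====
-- stated objective: alternative
-- what changed: Replaces A's accumulate-and-flush state machine (mutable current_chunk flushed at each section header) by an index-first design: one pass collects the boundary line indices, then chunks are built by slicing the line list between consecutive boundaries; the trailing '## Methods' post-step is unchanged.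
import Mathlib
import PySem

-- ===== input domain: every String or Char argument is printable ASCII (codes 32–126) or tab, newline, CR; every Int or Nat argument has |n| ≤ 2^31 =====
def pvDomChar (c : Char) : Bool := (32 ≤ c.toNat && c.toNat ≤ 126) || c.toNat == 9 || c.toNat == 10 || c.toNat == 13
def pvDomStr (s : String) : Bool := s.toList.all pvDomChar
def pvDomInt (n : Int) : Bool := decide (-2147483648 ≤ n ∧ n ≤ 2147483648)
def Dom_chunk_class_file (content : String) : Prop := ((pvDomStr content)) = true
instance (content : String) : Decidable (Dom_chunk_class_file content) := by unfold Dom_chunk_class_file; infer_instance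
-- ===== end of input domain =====

-- B replaces A's accumulate-and-flush state machine by a boundary-index pass followed by
-- slicing between consecutive boundaries (objective: alternative decomposition, same cost).

-- ===== PORT A =====
-- flush_chunk (returns the updated chunks list instead of mutating)
def pvFlush (current_chunk chunks : List String) : List String :=
  if current_chunk ≠ [] then chunks ++ [PySem.Str.strip (PySem.Str.join "\n" current_chunk)]
  else chunks

-- A's boundary condition; lines[i+2] is ported with pyGetD "" — Pre_ guarantees the
-- index is in range whenever this branch reads it, so the default is never consulted inside Pre_.
def pvCondA (lines : List String) (i : Int) (line : String) : Bool :=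
  PySem.Str.startswith line "## Constructors"
  || (PySem.Str.startswith line "## Properties"
      && PySem.Str.startswith (PySem.List.pyGetD lines (i + 2) "") "###")
  || (PySem.Str.startswith line "## Methods"
      && PySem.Str.startswith (PySem.List.pyGetD lines (i + 2) "") "###")

-- the trailing '## Methods' post-processing (identical code in both Pythons);
-- chunk.split("***") has a non-empty literal separator, so Str.split? is always `some`
def pvPost (chunks : List String) : List String :=
  if chunks ≠ [] && PySem.Str.startswith (PySem.List.pyGetD chunks (-1) "") "## Methods" then
    let chunk := PySem.List.pyGetD chunks (-1) ""
    let chunks := chunks.dropLast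
    chunks ++ ((((PySem.Str.split? chunk "***").getD []).map PySem.Str.strip).filter (fun m => m ≠ ""))
  else chunks

def chunk_class_file (content : String) : List String :=
  let lines := PySem.Str.splitlines content
  let st := (PySem.List.enumerate lines 0).foldl
    (fun (st : List String × List String) p =>
      if pvCondA lines p.1 p.2 then (pvFlush st.2 st.1, [p.2])
      else (st.1, st.2 ++ [p.2]))
    ([], [])
  pvPost (pvFlush st.2 st.1)

-- ===== PORT B =====
def pvCondB (lines : List String) (i : Int) (line : String) : Bool :=
  PySem.Str.startswith line "## Constructors"
  || ((PySem.Str.startswith line "## Properties" || PySem.Str.startswith line "## Methods")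
      && PySem.Str.startswith (PySem.List.pyGetD lines (i + 2) "") "###")

def chunk_class_file_alt (content : String) : List String :=
  let lines := PySem.Str.splitlines content
  let n : Int := lines.length
  let boundaries := (PySem.List.enumerate lines 0).foldl
    (fun acc p => if pvCondB lines p.1 p.2 then acc ++ [p.1] else acc) ([] : List Int)
  let chunks := (List.zip ((0 : Int) :: boundaries) (boundaries ++ [n])).foldl
    (fun acc ab =>
      let seg := PySem.List.slice lines (some ab.1) (some ab.2)
      if seg ≠ [] then acc ++ [PySem.Str.strip (PySem.Str.join "\n" seg)] else acc)
    []
  pvPost chunks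

-- ===== PRECONDITION & SPEC =====
-- Pre_ excludes exactly the inputs on which A raises IndexError: a line starting with
-- "## Properties" or "## Methods" within the last two lines (lines[i+2] out of range).
def Pre_chunk_class_file (content : String) : Prop :=
  ∀ i : Nat, (h : i < (PySem.Str.splitlines content).length) →
    (PySem.Str.startswith (PySem.Str.splitlines content)[i] "## Properties" = true
      ∨ PySem.Str.startswith (PySem.Str.splitlines content)[i] "## Methods" = true) →
    i + 2 < (PySem.Str.splitlines content).length

instance (content : String) : Decidable (Pre_chunk_class_file content) := by
  unfold Pre_chunk_class_file; infer_instance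

def pvWitness_chunk_class_file : String := "## Constructors\n### new\nx\n## Methods\n\n### run\nbody"

def Spec_chunk_class_file (content : String) (out : List String) : Prop := out = chunk_class_file_alt content
instance (content : String) (out : List String) : Decidable (Spec_chunk_class_file content out) := by unfold Spec_chunk_class_file; infer_instance

-- ===== CLAIM (what is proved, stated in full; the proofs are below) =====
def Claim_equal_chunk_class_file : Prop := ∀ (content : String), Dom_chunk_class_file content → Pre_chunk_class_file content → Spec_chunk_class_file content (chunk_class_file content)

-- ===== LEMMAS AND PROOFS =====

-- proof-only helpers
def flushL (cur : List String) : List String :=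
  if cur = [] then [] else [PySem.Str.strip (PySem.Str.join "\n" cur)]

theorem pvFlush_eq (cur chunks : List String) : pvFlush cur chunks = chunks ++ flushL cur := by
  cases cur <;> simp [pvFlush, flushL]

theorem cond_eq (L : List String) (i : Int) (line : String) :
    pvCondA L i line = pvCondB L i line := by
  unfold pvCondA pvCondB
  cases PySem.Str.startswith line "## Constructors" <;>
  cases PySem.Str.startswith line "## Properties" <;>
  cases PySem.Str.startswith line "## Methods" <;>
  cases PySem.Str.startswith (PySem.List.pyGetD L (i + 2) "") "###" <;> rfl

-- the common recursive shape: chunks produced from the remaining lines at index j with pending cur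
def segN (L : List String) : List String → Nat → List String → List String
  | [], _, cur => flushL cur
  | x :: rest, j, cur =>
      if pvCondA L (j : Int) x then flushL cur ++ segN L rest (j + 1) [x]
      else segN L rest (j + 1) (cur ++ [x])

-- boundary indices of the remaining lines
def bndsN (L : List String) : List String → Nat → List Nat
  | [], _ => []
  | x :: rest, j => if pvCondB L (j : Int) x then j :: bndsN L rest (j + 1) else bndsN L rest (j + 1)

-- chunks obtained by slicing between consecutive boundaries
def chunksOfBounds (L : List String) : Nat → List Nat → List String
  | prev, [] => flushL ((L.drop prev).take (L.length - prev))
  | prev, b :: bs => flushL ((L.drop prev).take (b - prev)) ++ chunksOfBounds L b bs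

-- A's loop computes segN
theorem lemA (L : List String) (suffix : List String) (j : Nat) (chunks cur : List String) :
    pvFlush ((PySem.List.enumerate suffix (j : Int)).foldl
      (fun (st : List String × List String) p =>
        if pvCondA L p.1 p.2 then (pvFlush st.2 st.1, [p.2])
        else (st.1, st.2 ++ [p.2])) (chunks, cur)).2
      ((PySem.List.enumerate suffix (j : Int)).foldl
      (fun (st : List String × List String) p =>
        if pvCondA L p.1 p.2 then (pvFlush st.2 st.1, [p.2])
        else (st.1, st.2 ++ [p.2])) (chunks, cur)).1
    = chunks ++ segN L suffix j cur := by
  induction suffix generalizing j chunks cur with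
  | nil => simp [PySem.List.enumerate_nil, segN, pvFlush_eq]
  | cons x rest ih =>
      rw [PySem.List.enumerate_cons]
      simp only [List.foldl_cons, segN]
      rw [show ((j : Int) + 1) = ((j + 1 : Nat) : Int) by push_cast; ring]
      by_cases h : pvCondA L (j : Int) x = true
      · simp only [h, if_pos]
        rw [ih (j + 1) (pvFlush cur chunks) [x], pvFlush_eq, List.append_assoc]
      · simp only [h, Bool.false_eq_true, if_false]
        exact ih (j + 1) chunks (cur ++ [x])

-- segN equals the slice-based construction
theorem lemB (L : List String) (suffix : List String) (j prev : Nat)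
    (hdrop : L.drop j = suffix) (hle : prev ≤ j) :
    segN L suffix j ((L.drop prev).take (j - prev)) = chunksOfBounds L prev (bndsN L suffix j) := by
  induction suffix generalizing j prev with
  | nil =>
      have hn : L.length ≤ j := List.drop_eq_nil_iff.mp hdrop
      simp only [segN, bndsN, chunksOfBounds]
      congr 1
      rw [List.take_of_length_le (by simp; omega), List.take_of_length_le (by simp)]
  | cons x rest ih =>
      have hj : j < L.length := by
        by_contra hc
        push_neg at hc
        have h0 : L.drop j = [] := List.drop_eq_nil_iff.mpr hc
        rw [hdrop] at h0
        simp at h0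
      have hget : L[j]? = some x := by
        have h0 : (List.drop j L)[0]? = L[j + 0]? := List.getElem?_drop
        rw [hdrop] at h0
        simpa using h0.symm
      have hdrop' : L.drop (j + 1) = rest := by
        rw [← List.tail_drop, hdrop, List.tail_cons]
      simp only [segN, bndsN, cond_eq]
      by_cases h : pvCondB L (j : Int) x = true
      · simp only [h, if_pos, chunksOfBounds]
        congr 1
        have h1 : [x] = (L.drop (j + 1 - 1)).take ((j + 1) - j) := by
          simp only [Nat.add_sub_cancel, hdrop]
          simp
        calc segN L rest (j + 1) [x]
            = segN L rest (j + 1) ((L.drop j).take ((j + 1) - j)) := by rw [hdrop]; simp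
          _ = chunksOfBounds L j (bndsN L rest (j + 1)) := ih (j + 1) j hdrop' (by omega)
      · simp only [h, Bool.false_eq_true, if_false]
        have hcur : (L.drop prev).take (j - prev) ++ [x] = (L.drop prev).take ((j + 1) - prev) := by
          have hidx : (L.drop prev)[j - prev]? = some x := by
            have h0 : (List.drop prev L)[j - prev]? = L[prev + (j - prev)]? := List.getElem?_drop
            rw [show prev + (j - prev) = j by omega] at h0
            rw [h0]; exact hget
          rw [show (j + 1) - prev = (j - prev) + 1 by omega, List.take_succ, hidx]
          rfl
        rw [hcur]
        exact ih (j + 1) prev hdrop' (by omega)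

-- B's boundary loop computes bndsN (as Ints)
theorem lemC1 (L : List String) (suffix : List String) (j : Nat) (acc : List Int) :
    (PySem.List.enumerate suffix (j : Int)).foldl
      (fun acc p => if pvCondB L p.1 p.2 then acc ++ [p.1] else acc) acc
    = acc ++ (bndsN L suffix j).map Int.ofNat := by
  induction suffix generalizing j acc with
  | nil => simp [PySem.List.enumerate_nil, bndsN]
  | cons x rest ih =>
      rw [PySem.List.enumerate_cons]
      simp only [List.foldl_cons, bndsN]
      rw [show ((j : Int) + 1) = ((j + 1 : Nat) : Int) by push_cast; ring]
      by_cases h : pvCondB L (j : Int) x = true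
      · simp only [h, if_pos, List.map_cons]
        rw [ih (j + 1)]
        simp [Int.ofNat_eq_natCast]
      · simp only [h, Bool.false_eq_true, if_false]
        exact ih (j + 1) acc

-- B's zip/slice loop computes chunksOfBounds
theorem lemC2 (L : List String) (prev : Nat) (bs : List Nat) :
    (List.zip (Int.ofNat prev :: bs.map Int.ofNat)
              (bs.map Int.ofNat ++ [Int.ofNat L.length])).flatMap
      (fun ab => flushL (PySem.List.slice L (some ab.1) (some ab.2)))
    = chunksOfBounds L prev bs := by
  induction bs generalizing prev with
  | nil =>
      simp [chunksOfBounds, Int.ofNat_eq_natCast, PySem.List.slice_natCast]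
  | cons b bs ih =>
      simp only [List.map_cons, List.cons_append, List.zip_cons_cons, List.flatMap_cons,
        chunksOfBounds]
      rw [ih b]
      congr 1
      simp [Int.ofNat_eq_natCast, PySem.List.slice_natCast]

-- ===== VERDICT (by name: the statement is the Claim_ definition above) =====
theorem chunk_class_file_spec : Claim_equal_chunk_class_file := by
  intro content _ _
  unfold Spec_chunk_class_file
  simp only [chunk_class_file, chunk_class_file_alt]
  congr 1
  -- A side: the fold-and-flush is segN, which equals the slice-based chunksOfBounds
  have hA := lemA (PySem.Str.splitlines content) (PySem.Str.splitlines content) 0 [] []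
  simp only [Nat.cast_zero] at hA
  rw [hA, List.nil_append]
  have hB := lemB (PySem.Str.splitlines content) (PySem.Str.splitlines content) 0 0 (by simp) (le_refl 0)
  simp only [Nat.sub_zero, List.drop_zero, List.take_zero] at hB
  rw [hB]
  -- B side: boundaries then zip/slice fold give the same chunksOfBounds
  have hC1 := lemC1 (PySem.Str.splitlines content) (PySem.Str.splitlines content) 0 []
  simp only [Nat.cast_zero] at hC1
  rw [hC1, List.nil_append]
  have hfold :
    ∀ (zs : List (Int × Int)) (acc : List String),
      zs.foldl (fun acc ab =>
        let seg := PySem.List.slice (PySem.Str.splitlines content) (some ab.1) (some ab.2)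
        if seg ≠ [] then acc ++ [PySem.Str.strip (PySem.Str.join "\n" seg)] else acc) acc
      = acc ++ zs.flatMap (fun ab => flushL (PySem.List.slice (PySem.Str.splitlines content) (some ab.1) (some ab.2))) := by
    intro zs
    induction zs with
    | nil => intro acc; simp
    | cons z zs ih =>
        intro acc
        simp only [List.foldl_cons, List.flatMap_cons]
        rw [show (let seg := PySem.List.slice (PySem.Str.splitlines content) (some z.1) (some z.2)
              if seg ≠ [] then acc ++ [PySem.Str.strip (PySem.Str.join "\n" seg)] else acc)
            = acc ++ flushL (PySem.List.slice (PySem.Str.splitlines content) (some z.1) (some z.2)) by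
          cases hs : PySem.List.slice (PySem.Str.splitlines content) (some z.1) (some z.2) <;>
            simp [flushL, hs]]
        rw [ih, List.append_assoc]
  rw [hfold, List.nil_append]
  exact (lemC2 (PySem.Str.splitlines content) 0 (bndsN (PySem.Str.splitlines content) (PySem.Str.splitlines content) 0)).symm
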